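-- pv_equiv track=rewrite | github.com/alu-rwa-dsa/week-2--create-multiple-unit-tests-dsa_elnaam_sugira_liplan | question5.py | ocurrenceCalc
-- ===== SOURCE A (Python) =====
-- def ocurrenceCalc(num):
--     ls = []
--     val = num
--     occ = 1
--
--     while val != 0:  #O(N)
--         addls = num - (val - 1)
--         ls.append(addls)
--         if occ == addls:
--             val = val - 1  # go to next num
--             occ = 1
--         else:
--             occ = occ + 1  # O(logn)
--
--     return ls
-- ===== SOURCE B (Python) =====
-- def ocurrenceCalc(num):
--     return [k for k in range(1, num + 1) for _ in range(k)]
-- ===== Notes on version B (the rewrite author's own statement) =====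
-- stated objective: simpler
-- what changed: Replaces the single while loop with occ/val counter arithmetic by a nested comprehension that emits each k in 1..num exactly k times directly.
import Mathlib
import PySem

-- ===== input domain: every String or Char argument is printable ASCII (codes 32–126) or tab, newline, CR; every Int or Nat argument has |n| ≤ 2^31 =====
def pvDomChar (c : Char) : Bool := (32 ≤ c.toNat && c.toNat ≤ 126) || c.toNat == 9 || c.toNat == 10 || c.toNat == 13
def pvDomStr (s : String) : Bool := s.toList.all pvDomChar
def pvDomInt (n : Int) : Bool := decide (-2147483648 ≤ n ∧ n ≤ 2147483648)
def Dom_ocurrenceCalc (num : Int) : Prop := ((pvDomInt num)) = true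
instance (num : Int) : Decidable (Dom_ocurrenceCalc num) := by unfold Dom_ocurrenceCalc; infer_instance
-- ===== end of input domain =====

-- B replaces A's single while loop with occ/val counter arithmetic by nested range loops
-- that emit each k in 1..num exactly k times (objective: simpler).


-- ===== PORT A =====
-- A's while loop, step for step ('while val != 0', append addls, 'if occ == addls').
-- The fuel argument only makes the recursion total: for num ≥ 0 the Python loop runs
-- num(num+1)/2 ≤ num²+1 times, so the fuel is never exhausted there (proved below);
-- for num < 0 the Python loop never terminates (excluded by Pre_ocurrenceCalc).
def ocLoop (fuel : Nat) (num : Int) (ls : List Int) (val : Int) (occ : Int) : List Int :=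
  match fuel with
  | 0 => ls
  | fuel + 1 =>
    if val = 0 then ls
    else
      let addls := num - (val - 1)
      if occ = addls then ocLoop fuel num (ls ++ [addls]) (val - 1) 1
      else ocLoop fuel num (ls ++ [addls]) val (occ + 1)

def ocurrenceCalc (num : Int) : List Int :=
  ocLoop (num.toNat * num.toNat + 1) num [] num 1

-- ===== PORT B =====
-- [k for k in range(1, num + 1) for _ in range(k)]
def ocurrenceCalc_alt (num : Int) : List Int :=
  (PySem.List.pyRange 1 (num + 1) 1).flatMap
    (fun k => (PySem.List.pyRange 0 k 1).map (fun _ => k))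

-- ===== PRECONDITION & SPEC =====
-- For num < 0 the Python A never terminates (val counts away from 0), so those inputs
-- are excluded; A returns normally exactly for num ≥ 0.
def Pre_ocurrenceCalc (num : Int) : Prop := 0 ≤ num
instance (num : Int) : Decidable (Pre_ocurrenceCalc num) := by unfold Pre_ocurrenceCalc; infer_instance
def pvWitness_ocurrenceCalc : Int := 4

def Spec_ocurrenceCalc (num : Int) (out : List Int) : Prop := out = ocurrenceCalc_alt num
instance (num : Int) (out : List Int) : Decidable (Spec_ocurrenceCalc num out) := by unfold Spec_ocurrenceCalc; infer_instance

-- ===== CLAIM (what is proved, stated in full; the proofs are below) =====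
def Claim_equal_ocurrenceCalc : Prop := ∀ (num : Int), Dom_ocurrenceCalc num → Pre_ocurrenceCalc num → Spec_ocurrenceCalc num (ocurrenceCalc num)

-- ===== LEMMAS AND PROOFS =====

-- Fuel consumed by the loop to bring val down from v to 0 (addls = num-val+1 copies per level).
def ocFuel (v : Nat) (num : Int) : Nat :=
  match v with
  | 0 => 0
  | v + 1 => (num - v).toNat + ocFuel v num

theorem ocFuel_le (num : Int) : ∀ (v : Nat), ocFuel v num ≤ v * num.toNat := by
  intro v
  induction v with
  | zero => simp [ocFuel]
  | succ v ih =>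
      have h : (num - v).toNat ≤ num.toNat := by omega
      calc ocFuel (v + 1) num = (num - v).toNat + ocFuel v num := rfl
        _ ≤ num.toNat + v * num.toNat := Nat.add_le_add h ih
        _ = (v + 1) * num.toNat := by ring

-- Inner phase: for fixed val ≠ 0, the loop appends addls := num-(val-1) once per step
-- while occ climbs to addls, then moves to val-1 with occ reset to 1; it consumes
-- exactly c+1 units of fuel where c = addls - occ.
theorem ocLoop_inner (num val : Int) (hval : val ≠ 0) :
    ∀ (c : Nat) (f : Nat) (ls : List Int) (occ : Int), occ = num - (val - 1) - c →
      ocLoop (f + (c + 1)) num ls val occ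
        = ocLoop f num (ls ++ List.replicate (c + 1) (num - (val - 1))) (val - 1) 1 := by
  intro c
  induction c with
  | zero =>
      intro f ls occ hocc
      show ocLoop (f + 1) num ls val occ = _
      rw [ocLoop]
      simp only [hval, if_false]
      have : occ = num - (val - 1) := by omega
      simp [this, List.replicate]
  | succ c ih =>
      intro f ls occ hocc
      show ocLoop ((f + (c + 1)) + 1) num ls val occ = _
      rw [ocLoop]
      simp only [hval, if_false]
      have hne : ¬ (occ = num - (val - 1)) := by push_cast at hocc ⊢; omega
      simp only [hne, if_false]
      rw [ih f (ls ++ [num - (val - 1)]) (occ + 1) (by push_cast at hocc ⊢; omega)]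
      rw [List.append_assoc]
      simp [List.replicate_succ]

-- The constant inner comprehension over range(k) is k.toNat copies of k.
theorem inner_replicate (k : Int) :
    (PySem.List.pyRange 0 k 1).map (fun _ => k) = List.replicate k.toNat k := by
  rw [PySem.List.pyRange_one]
  simp [List.map_map, Function.comp_def]

-- Outer phase: starting at val = v with occ = 1 and ocFuel v num spare fuel, the loop
-- appends the blocks for k = num-v+1, …, num in order.
theorem ocLoop_outer :
    ∀ (v : Nat) (f : Nat) (num : Int) (ls : List Int), (v : Int) ≤ num →
      ocLoop (f + ocFuel v num) num ls v 1
        = ls ++ (PySem.List.pyRange (num - v + 1) (num + 1) 1).flatMap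
            (fun k => (PySem.List.pyRange 0 k 1).map (fun _ => k)) := by
  intro v
  induction v with
  | zero =>
      intro f num ls _
      cases f with
      | zero => simp [ocFuel, ocLoop]
      | succ f =>
          show ocLoop (f + 1 + ocFuel 0 num) num ls 0 1 = _
          simp [ocFuel, ocLoop]
  | succ v ih =>
      intro f num ls hle
      have hval : (((v : Nat) + 1 : Nat) : Int) ≠ 0 := by push_cast; omega
      have haddls : (1 : Int) ≤ num - (((v : Nat) + 1 : Nat) : Int) + 1 := by push_cast at hle ⊢; omega
      have hcnt : ((num - ((((v : Nat) + 1 : Nat) : Int) - 1)).toNat - 1) + 1 = (num - v).toNat := by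
        push_cast at hle ⊢; omega
      have hfuel : (f + ocFuel (v + 1) num)
          = ((f + ocFuel v num) + (((num - ((((v : Nat) + 1 : Nat) : Int) - 1)).toNat - 1) + 1)) := by
        rw [hcnt]; show f + ((num - v).toNat + ocFuel v num) = _; omega
      rw [hfuel,
        ocLoop_inner num _ hval ((num - ((((v : Nat) + 1 : Nat) : Int) - 1)).toNat - 1)
          (f + ocFuel v num) ls 1 (by push_cast at hle ⊢; omega)]
      have hv1 : (((v : Nat) + 1 : Nat) : Int) - 1 = (v : Int) := by push_cast; ring
      rw [hv1, ih f num _ (by push_cast at hle ⊢; omega)]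
      rw [List.append_assoc]
      congr 1
      have hcons : PySem.List.pyRange (num - (((v : Nat) + 1 : Nat) : Int) + 1) (num + 1) 1
          = (num - (v : Int)) :: PySem.List.pyRange (num - (v : Int) + 1) (num + 1) 1 := by
        have h1 : num - (((v : Nat) + 1 : Nat) : Int) + 1 = num - (v : Int) := by push_cast; ring
        rw [h1, PySem.List.pyRange_one_cons (by push_cast at hle ⊢; omega)]
      rw [hcons, List.flatMap_cons, inner_replicate]
      have h3 : (num - (v : Int)).toNat - 1 + 1 = (num - (v : Int)).toNat := by
        push_cast at hle; omega
      rw [h3]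

-- ===== VERDICT (by name: the statement is the Claim_ definition above) =====
theorem ocurrenceCalc_spec : Claim_equal_ocurrenceCalc := by
  intro num _ hpre
  unfold Spec_ocurrenceCalc ocurrenceCalc ocurrenceCalc_alt
  have h : ((num.toNat : Nat) : Int) = num := Int.toNat_of_nonneg hpre
  have hle : ocFuel num.toNat num ≤ num.toNat * num.toNat + 1 := by
    have := ocFuel_le num num.toNat
    omega
  have hsplit : num.toNat * num.toNat + 1
      = (num.toNat * num.toNat + 1 - ocFuel num.toNat num) + ocFuel num.toNat num := by omega
  rw [hsplit]
  have key := ocLoop_outer num.toNat (num.toNat * num.toNat + 1 - ocFuel num.toNat num) num []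
    (by omega)
  rw [h] at key
  rw [key]
  simp
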